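-- pv_equiv track=rewrite | github.com/netfoxor/stock-chat-bi | nanobot/stock_bot.py | _group_numeric_cols
-- ===== SOURCE A (Python) =====
-- _PRICE_COLS = {"open", "high", "low", "close", "pre_close"}
--
-- _VOLUME_COLS = {"vol", "volume"}
--
-- _AMOUNT_COLS = {"amount", "turnover"}
--
-- _PCT_COLS = {"pct_chg", "pct_change", "change_pct", "pctchg"}
--
-- _CHANGE_COLS = {"change", "chg"}
--
-- def _group_numeric_cols(cols: list[str]) -> dict[str, list[str]]:
--     """把数值列按语义分组；未识别的归入 'other'，保留画图顺序。"""
--     groups: dict[str, list[str]] = {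
--         "price": [], "volume": [], "amount": [],
--         "pct": [], "change": [], "other": [],
--     }
--     for c in cols:
--         lc = str(c).lower()
--         if lc in _PRICE_COLS:
--             groups["price"].append(c)
--         elif lc in _VOLUME_COLS:
--             groups["volume"].append(c)
--         elif lc in _AMOUNT_COLS:
--             groups["amount"].append(c)
--         elif lc in _PCT_COLS:
--             groups["pct"].append(c)
--         elif lc in _CHANGE_COLS:
--             groups["change"].append(c)
--         else:
--             groups["other"].append(c)
--     return {k: v for k, v in groups.items() if v}
-- ===== SOURCE B (Python) =====
-- _CATEGORY = {
--     "open": "price", "high": "price", "low": "price", "close": "price", "pre_close": "price",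
--     "vol": "volume", "volume": "volume",
--     "amount": "amount", "turnover": "amount",
--     "pct_chg": "pct", "pct_change": "pct", "change_pct": "pct", "pctchg": "pct",
--     "change": "change", "chg": "change",
-- }
--
-- _ORDER = ["price", "volume", "amount", "pct", "change", "other"]
--
--
-- def _group_numeric_cols(cols: list[str]) -> dict[str, list[str]]:
--     """把数值列按语义分组；未识别的归入 'other'，保留画图顺序。"""
--     out: dict[str, list[str]] = {}
--     for k in _ORDER:
--         v = [c for c in cols if _CATEGORY.get(str(c).lower(), "other") == k]
--         if v:
--             out[k] = v
--     return out
-- ===== Notes on version B (the rewrite author's own statement) =====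
-- stated objective: idiomatic
-- what changed: Replaces the five-way if/elif dispatch with a single inverted lookup table, and builds the result with one filtering comprehension per category key instead of a single loop appending into pre-initialized buckets.
import Mathlib
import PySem

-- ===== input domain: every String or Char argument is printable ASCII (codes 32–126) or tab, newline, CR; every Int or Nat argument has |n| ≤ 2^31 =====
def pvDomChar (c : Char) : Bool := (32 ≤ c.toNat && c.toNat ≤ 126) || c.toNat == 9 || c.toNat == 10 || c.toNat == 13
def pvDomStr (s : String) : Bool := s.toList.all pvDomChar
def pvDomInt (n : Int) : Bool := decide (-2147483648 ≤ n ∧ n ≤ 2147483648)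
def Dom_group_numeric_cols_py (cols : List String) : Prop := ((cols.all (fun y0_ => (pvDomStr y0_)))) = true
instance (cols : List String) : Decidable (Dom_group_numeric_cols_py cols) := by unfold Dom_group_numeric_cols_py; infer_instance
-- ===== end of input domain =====

-- B replaces A's five-way if/elif dispatch with a single inverted lookup table and builds the
-- result with one filtering pass per category key (idiomatic alternative; same O(n) cost).

-- ===== PORT A =====
def pvPRICE : PySem.Set String := PySem.Set.ofList ["open", "high", "low", "close", "pre_close"]
def pvVOLUME : PySem.Set String := PySem.Set.ofList ["vol", "volume"]
def pvAMOUNT : PySem.Set String := PySem.Set.ofList ["amount", "turnover"]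
def pvPCT : PySem.Set String := PySem.Set.ofList ["pct_chg", "pct_change", "change_pct", "pctchg"]
def pvCHANGE : PySem.Set String := PySem.Set.ofList ["change", "chg"]

-- loop body of A (the if/elif chain appending c to one of the six buckets)
def pvStepA (g : List String × List String × List String × List String × List String × List String)
    (c : String) : List String × List String × List String × List String × List String × List String :=
  let lc := PySem.Str.lower c
  if PySem.Set.contains pvPRICE lc then (g.1 ++ [c], g.2.1, g.2.2.1, g.2.2.2.1, g.2.2.2.2.1, g.2.2.2.2.2)
  else if PySem.Set.contains pvVOLUME lc then (g.1, g.2.1 ++ [c], g.2.2.1, g.2.2.2.1, g.2.2.2.2.1, g.2.2.2.2.2)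
  else if PySem.Set.contains pvAMOUNT lc then (g.1, g.2.1, g.2.2.1 ++ [c], g.2.2.2.1, g.2.2.2.2.1, g.2.2.2.2.2)
  else if PySem.Set.contains pvPCT lc then (g.1, g.2.1, g.2.2.1, g.2.2.2.1 ++ [c], g.2.2.2.2.1, g.2.2.2.2.2)
  else if PySem.Set.contains pvCHANGE lc then (g.1, g.2.1, g.2.2.1, g.2.2.2.1, g.2.2.2.2.1 ++ [c], g.2.2.2.2.2)
  else (g.1, g.2.1, g.2.2.1, g.2.2.2.1, g.2.2.2.2.1, g.2.2.2.2.2 ++ [c])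

def group_numeric_cols_py (cols : List String) : List (String × List String) :=
  let g := cols.foldl pvStepA (([] : List String), [], [], [], [], [])
  ([("price", g.1), ("volume", g.2.1), ("amount", g.2.2.1),
    ("pct", g.2.2.2.1), ("change", g.2.2.2.2.1), ("other", g.2.2.2.2.2)]).filter
    (fun kv => !kv.2.isEmpty)

-- ===== PORT B =====
def pvCATEGORY : PySem.Dict String String := PySem.Dict.ofList
  [("open", "price"), ("high", "price"), ("low", "price"), ("close", "price"), ("pre_close", "price"), ("vol", "volume"), ("volume", "volume"), ("amount", "amount"), ("turnover", "amount"), ("pct_chg", "pct"), ("pct_change", "pct"), ("change_pct", "pct"), ("pctchg", "pct"), ("change", "change"), ("chg", "change")]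

def pvORDER : List String := ["price", "volume", "amount", "pct", "change", "other"]

def group_numeric_cols_py_alt (cols : List String) : List (String × List String) :=
  pvORDER.foldl (fun out k =>
    let v := cols.filter (fun c => PySem.Dict.getD pvCATEGORY (PySem.Str.lower c) "other" == k)
    if !v.isEmpty then out ++ [(k, v)] else out) []

-- ===== PRECONDITION & SPEC =====
def Spec_group_numeric_cols_py (cols : List String) (out : List (String × List String)) : Prop := out = group_numeric_cols_py_alt cols
instance (cols : List String) (out : List (String × List String)) : Decidable (Spec_group_numeric_cols_py cols out) := by unfold Spec_group_numeric_cols_py; infer_instance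

-- ===== CLAIM (what is proved, stated in full; the proofs are below) =====
def Claim_equal_group_numeric_cols_py : Prop := ∀ (cols : List String), Dom_group_numeric_cols_py cols → Spec_group_numeric_cols_py cols (group_numeric_cols_py cols)

-- ===== LEMMAS AND PROOFS =====

-- branch predicates of A's chain, as functions of the column name
def pvIsP (c : String) : Bool := PySem.Set.contains pvPRICE (PySem.Str.lower c)
def pvIsV (c : String) : Bool := !pvIsP c && PySem.Set.contains pvVOLUME (PySem.Str.lower c)
def pvIsA (c : String) : Bool := !pvIsP c && (!PySem.Set.contains pvVOLUME (PySem.Str.lower c) && PySem.Set.contains pvAMOUNT (PySem.Str.lower c))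
def pvIsPc (c : String) : Bool := !pvIsP c && (!PySem.Set.contains pvVOLUME (PySem.Str.lower c) && (!PySem.Set.contains pvAMOUNT (PySem.Str.lower c) && PySem.Set.contains pvPCT (PySem.Str.lower c)))
def pvIsCh (c : String) : Bool := !pvIsP c && (!PySem.Set.contains pvVOLUME (PySem.Str.lower c) && (!PySem.Set.contains pvAMOUNT (PySem.Str.lower c) && (!PySem.Set.contains pvPCT (PySem.Str.lower c) && PySem.Set.contains pvCHANGE (PySem.Str.lower c))))
def pvIsO (c : String) : Bool := !pvIsP c && (!PySem.Set.contains pvVOLUME (PySem.Str.lower c) && (!PySem.Set.contains pvAMOUNT (PySem.Str.lower c) && (!PySem.Set.contains pvPCT (PySem.Str.lower c) && !PySem.Set.contains pvCHANGE (PySem.Str.lower c))))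

lemma pvFoldA (cols : List String) (p v a pc ch o : List String) :
    cols.foldl pvStepA (p, v, a, pc, ch, o) =
      (p ++ cols.filter pvIsP, v ++ cols.filter pvIsV, a ++ cols.filter pvIsA,
       pc ++ cols.filter pvIsPc, ch ++ cols.filter pvIsCh, o ++ cols.filter pvIsO) := by
  induction cols generalizing p v a pc ch o with
  | nil => simp
  | cons c cs ih =>
    simp only [List.foldl_cons, pvStepA]
    by_cases h1 : PySem.Str.lower c ∈ pvPRICE <;>
      by_cases h2 : PySem.Str.lower c ∈ pvVOLUME <;>
      by_cases h3 : PySem.Str.lower c ∈ pvAMOUNT <;>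
      by_cases h4 : PySem.Str.lower c ∈ pvPCT <;>
      by_cases h5 : PySem.Str.lower c ∈ pvCHANGE <;>
      simp [h1, h2, h3, h4, h5, ih, List.filter_cons, pvIsP, pvIsV, pvIsA, pvIsPc, pvIsCh, pvIsO]

set_option maxHeartbeats 1000000 in
lemma pvCATEGORY_eq : pvCATEGORY = PySem.Dict.mk
  [("open", "price"), ("high", "price"), ("low", "price"), ("close", "price"), ("pre_close", "price"), ("vol", "volume"), ("volume", "volume"), ("amount", "amount"), ("turnover", "amount"), ("pct_chg", "pct"), ("pct_change", "pct"), ("change_pct", "pct"), ("pctchg", "pct"), ("change", "change"), ("chg", "change")] := by decide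

lemma pvPRICE_eq : pvPRICE = ["open", "high", "low", "close", "pre_close"] := by decide
lemma pvVOLUME_eq : pvVOLUME = ["vol", "volume"] := by decide
lemma pvAMOUNT_eq : pvAMOUNT = ["amount", "turnover"] := by decide
lemma pvPCT_eq : pvPCT = ["pct_chg", "pct_change", "change_pct", "pctchg"] := by decide
lemma pvCHANGE_eq : pvCHANGE = ["change", "chg"] := by decide

set_option maxHeartbeats 1000000 in
lemma pvCat_price (s : String) :
    (PySem.Dict.getD pvCATEGORY s "other" == "price") = PySem.Set.contains pvPRICE s := by
  rw [pvCATEGORY_eq]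
  simp only [pvPRICE_eq, pvVOLUME_eq, pvAMOUNT_eq, pvPCT_eq, pvCHANGE_eq]
  simp only [PySem.Dict.getD_eq_get?_getD, PySem.Dict.get?_mk_cons]
  by_cases h1 : ("open" : String) = s
  · subst h1; decide
  rw [if_neg (by simp [h1])]
  by_cases h2 : ("high" : String) = s
  · subst h2; decide
  rw [if_neg (by simp [h2])]
  by_cases h3 : ("low" : String) = s
  · subst h3; decide
  rw [if_neg (by simp [h3])]
  by_cases h4 : ("close" : String) = s
  · subst h4; decide
  rw [if_neg (by simp [h4])]
  by_cases h5 : ("pre_close" : String) = s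
  · subst h5; decide
  rw [if_neg (by simp [h5])]
  by_cases h6 : ("vol" : String) = s
  · subst h6; decide
  rw [if_neg (by simp [h6])]
  by_cases h7 : ("volume" : String) = s
  · subst h7; decide
  rw [if_neg (by simp [h7])]
  by_cases h8 : ("amount" : String) = s
  · subst h8; decide
  rw [if_neg (by simp [h8])]
  by_cases h9 : ("turnover" : String) = s
  · subst h9; decide
  rw [if_neg (by simp [h9])]
  by_cases h10 : ("pct_chg" : String) = s
  · subst h10; decide
  rw [if_neg (by simp [h10])]
  by_cases h11 : ("pct_change" : String) = s
  · subst h11; decide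
  rw [if_neg (by simp [h11])]
  by_cases h12 : ("change_pct" : String) = s
  · subst h12; decide
  rw [if_neg (by simp [h12])]
  by_cases h13 : ("pctchg" : String) = s
  · subst h13; decide
  rw [if_neg (by simp [h13])]
  by_cases h14 : ("change" : String) = s
  · subst h14; decide
  rw [if_neg (by simp [h14])]
  by_cases h15 : ("chg" : String) = s
  · subst h15; decide
  rw [if_neg (by simp [h15])]
  simp [List.contains_eq_mem, PySem.Dict.get?, Ne.symm h1, Ne.symm h2, Ne.symm h3, Ne.symm h4, Ne.symm h5, Ne.symm h6, Ne.symm h7, Ne.symm h8, Ne.symm h9, Ne.symm h10, Ne.symm h11, Ne.symm h12, Ne.symm h13, Ne.symm h14, Ne.symm h15]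

set_option maxHeartbeats 1000000 in
lemma pvCat_volume (s : String) :
    (PySem.Dict.getD pvCATEGORY s "other" == "volume") = (!PySem.Set.contains pvPRICE s && PySem.Set.contains pvVOLUME s) := by
  rw [pvCATEGORY_eq]
  simp only [pvPRICE_eq, pvVOLUME_eq, pvAMOUNT_eq, pvPCT_eq, pvCHANGE_eq]
  simp only [PySem.Dict.getD_eq_get?_getD, PySem.Dict.get?_mk_cons]
  by_cases h1 : ("open" : String) = s
  · subst h1; decide
  rw [if_neg (by simp [h1])]
  by_cases h2 : ("high" : String) = s
  · subst h2; decide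
  rw [if_neg (by simp [h2])]
  by_cases h3 : ("low" : String) = s
  · subst h3; decide
  rw [if_neg (by simp [h3])]
  by_cases h4 : ("close" : String) = s
  · subst h4; decide
  rw [if_neg (by simp [h4])]
  by_cases h5 : ("pre_close" : String) = s
  · subst h5; decide
  rw [if_neg (by simp [h5])]
  by_cases h6 : ("vol" : String) = s
  · subst h6; decide
  rw [if_neg (by simp [h6])]
  by_cases h7 : ("volume" : String) = s
  · subst h7; decide
  rw [if_neg (by simp [h7])]
  by_cases h8 : ("amount" : String) = s
  · subst h8; decide
  rw [if_neg (by simp [h8])]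
  by_cases h9 : ("turnover" : String) = s
  · subst h9; decide
  rw [if_neg (by simp [h9])]
  by_cases h10 : ("pct_chg" : String) = s
  · subst h10; decide
  rw [if_neg (by simp [h10])]
  by_cases h11 : ("pct_change" : String) = s
  · subst h11; decide
  rw [if_neg (by simp [h11])]
  by_cases h12 : ("change_pct" : String) = s
  · subst h12; decide
  rw [if_neg (by simp [h12])]
  by_cases h13 : ("pctchg" : String) = s
  · subst h13; decide
  rw [if_neg (by simp [h13])]
  by_cases h14 : ("change" : String) = s
  · subst h14; decide
  rw [if_neg (by simp [h14])]
  by_cases h15 : ("chg" : String) = s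
  · subst h15; decide
  rw [if_neg (by simp [h15])]
  simp [List.contains_eq_mem, PySem.Dict.get?, Ne.symm h1, Ne.symm h2, Ne.symm h3, Ne.symm h4, Ne.symm h5, Ne.symm h6, Ne.symm h7, Ne.symm h8, Ne.symm h9, Ne.symm h10, Ne.symm h11, Ne.symm h12, Ne.symm h13, Ne.symm h14, Ne.symm h15]

set_option maxHeartbeats 1000000 in
lemma pvCat_amount (s : String) :
    (PySem.Dict.getD pvCATEGORY s "other" == "amount") = (!PySem.Set.contains pvPRICE s && (!PySem.Set.contains pvVOLUME s && PySem.Set.contains pvAMOUNT s)) := by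
  rw [pvCATEGORY_eq]
  simp only [pvPRICE_eq, pvVOLUME_eq, pvAMOUNT_eq, pvPCT_eq, pvCHANGE_eq]
  simp only [PySem.Dict.getD_eq_get?_getD, PySem.Dict.get?_mk_cons]
  by_cases h1 : ("open" : String) = s
  · subst h1; decide
  rw [if_neg (by simp [h1])]
  by_cases h2 : ("high" : String) = s
  · subst h2; decide
  rw [if_neg (by simp [h2])]
  by_cases h3 : ("low" : String) = s
  · subst h3; decide
  rw [if_neg (by simp [h3])]
  by_cases h4 : ("close" : String) = s
  · subst h4; decide
  rw [if_neg (by simp [h4])]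
  by_cases h5 : ("pre_close" : String) = s
  · subst h5; decide
  rw [if_neg (by simp [h5])]
  by_cases h6 : ("vol" : String) = s
  · subst h6; decide
  rw [if_neg (by simp [h6])]
  by_cases h7 : ("volume" : String) = s
  · subst h7; decide
  rw [if_neg (by simp [h7])]
  by_cases h8 : ("amount" : String) = s
  · subst h8; decide
  rw [if_neg (by simp [h8])]
  by_cases h9 : ("turnover" : String) = s
  · subst h9; decide
  rw [if_neg (by simp [h9])]
  by_cases h10 : ("pct_chg" : String) = s
  · subst h10; decide
  rw [if_neg (by simp [h10])]
  by_cases h11 : ("pct_change" : String) = s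
  · subst h11; decide
  rw [if_neg (by simp [h11])]
  by_cases h12 : ("change_pct" : String) = s
  · subst h12; decide
  rw [if_neg (by simp [h12])]
  by_cases h13 : ("pctchg" : String) = s
  · subst h13; decide
  rw [if_neg (by simp [h13])]
  by_cases h14 : ("change" : String) = s
  · subst h14; decide
  rw [if_neg (by simp [h14])]
  by_cases h15 : ("chg" : String) = s
  · subst h15; decide
  rw [if_neg (by simp [h15])]
  simp [List.contains_eq_mem, PySem.Dict.get?, Ne.symm h1, Ne.symm h2, Ne.symm h3, Ne.symm h4, Ne.symm h5, Ne.symm h6, Ne.symm h7, Ne.symm h8, Ne.symm h9, Ne.symm h10, Ne.symm h11, Ne.symm h12, Ne.symm h13, Ne.symm h14, Ne.symm h15]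

set_option maxHeartbeats 1000000 in
lemma pvCat_pct (s : String) :
    (PySem.Dict.getD pvCATEGORY s "other" == "pct") = (!PySem.Set.contains pvPRICE s && (!PySem.Set.contains pvVOLUME s && (!PySem.Set.contains pvAMOUNT s && PySem.Set.contains pvPCT s))) := by
  rw [pvCATEGORY_eq]
  simp only [pvPRICE_eq, pvVOLUME_eq, pvAMOUNT_eq, pvPCT_eq, pvCHANGE_eq]
  simp only [PySem.Dict.getD_eq_get?_getD, PySem.Dict.get?_mk_cons]
  by_cases h1 : ("open" : String) = s
  · subst h1; decide
  rw [if_neg (by simp [h1])]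
  by_cases h2 : ("high" : String) = s
  · subst h2; decide
  rw [if_neg (by simp [h2])]
  by_cases h3 : ("low" : String) = s
  · subst h3; decide
  rw [if_neg (by simp [h3])]
  by_cases h4 : ("close" : String) = s
  · subst h4; decide
  rw [if_neg (by simp [h4])]
  by_cases h5 : ("pre_close" : String) = s
  · subst h5; decide
  rw [if_neg (by simp [h5])]
  by_cases h6 : ("vol" : String) = s
  · subst h6; decide
  rw [if_neg (by simp [h6])]
  by_cases h7 : ("volume" : String) = s
  · subst h7; decide
  rw [if_neg (by simp [h7])]
  by_cases h8 : ("amount" : String) = s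
  · subst h8; decide
  rw [if_neg (by simp [h8])]
  by_cases h9 : ("turnover" : String) = s
  · subst h9; decide
  rw [if_neg (by simp [h9])]
  by_cases h10 : ("pct_chg" : String) = s
  · subst h10; decide
  rw [if_neg (by simp [h10])]
  by_cases h11 : ("pct_change" : String) = s
  · subst h11; decide
  rw [if_neg (by simp [h11])]
  by_cases h12 : ("change_pct" : String) = s
  · subst h12; decide
  rw [if_neg (by simp [h12])]
  by_cases h13 : ("pctchg" : String) = s
  · subst h13; decide
  rw [if_neg (by simp [h13])]
  by_cases h14 : ("change" : String) = s
  · subst h14; decide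
  rw [if_neg (by simp [h14])]
  by_cases h15 : ("chg" : String) = s
  · subst h15; decide
  rw [if_neg (by simp [h15])]
  simp [List.contains_eq_mem, PySem.Dict.get?, Ne.symm h1, Ne.symm h2, Ne.symm h3, Ne.symm h4, Ne.symm h5, Ne.symm h6, Ne.symm h7, Ne.symm h8, Ne.symm h9, Ne.symm h10, Ne.symm h11, Ne.symm h12, Ne.symm h13, Ne.symm h14, Ne.symm h15]

set_option maxHeartbeats 1000000 in
lemma pvCat_change (s : String) :
    (PySem.Dict.getD pvCATEGORY s "other" == "change") = (!PySem.Set.contains pvPRICE s && (!PySem.Set.contains pvVOLUME s && (!PySem.Set.contains pvAMOUNT s && (!PySem.Set.contains pvPCT s && PySem.Set.contains pvCHANGE s)))) := by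
  rw [pvCATEGORY_eq]
  simp only [pvPRICE_eq, pvVOLUME_eq, pvAMOUNT_eq, pvPCT_eq, pvCHANGE_eq]
  simp only [PySem.Dict.getD_eq_get?_getD, PySem.Dict.get?_mk_cons]
  by_cases h1 : ("open" : String) = s
  · subst h1; decide
  rw [if_neg (by simp [h1])]
  by_cases h2 : ("high" : String) = s
  · subst h2; decide
  rw [if_neg (by simp [h2])]
  by_cases h3 : ("low" : String) = s
  · subst h3; decide
  rw [if_neg (by simp [h3])]
  by_cases h4 : ("close" : String) = s
  · subst h4; decide
  rw [if_neg (by simp [h4])]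
  by_cases h5 : ("pre_close" : String) = s
  · subst h5; decide
  rw [if_neg (by simp [h5])]
  by_cases h6 : ("vol" : String) = s
  · subst h6; decide
  rw [if_neg (by simp [h6])]
  by_cases h7 : ("volume" : String) = s
  · subst h7; decide
  rw [if_neg (by simp [h7])]
  by_cases h8 : ("amount" : String) = s
  · subst h8; decide
  rw [if_neg (by simp [h8])]
  by_cases h9 : ("turnover" : String) = s
  · subst h9; decide
  rw [if_neg (by simp [h9])]
  by_cases h10 : ("pct_chg" : String) = s
  · subst h10; decide
  rw [if_neg (by simp [h10])]
  by_cases h11 : ("pct_change" : String) = s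
  · subst h11; decide
  rw [if_neg (by simp [h11])]
  by_cases h12 : ("change_pct" : String) = s
  · subst h12; decide
  rw [if_neg (by simp [h12])]
  by_cases h13 : ("pctchg" : String) = s
  · subst h13; decide
  rw [if_neg (by simp [h13])]
  by_cases h14 : ("change" : String) = s
  · subst h14; decide
  rw [if_neg (by simp [h14])]
  by_cases h15 : ("chg" : String) = s
  · subst h15; decide
  rw [if_neg (by simp [h15])]
  simp [List.contains_eq_mem, PySem.Dict.get?, Ne.symm h1, Ne.symm h2, Ne.symm h3, Ne.symm h4, Ne.symm h5, Ne.symm h6, Ne.symm h7, Ne.symm h8, Ne.symm h9, Ne.symm h10, Ne.symm h11, Ne.symm h12, Ne.symm h13, Ne.symm h14, Ne.symm h15]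

set_option maxHeartbeats 1000000 in
lemma pvCat_other (s : String) :
    (PySem.Dict.getD pvCATEGORY s "other" == "other") = (!PySem.Set.contains pvPRICE s && (!PySem.Set.contains pvVOLUME s && (!PySem.Set.contains pvAMOUNT s && (!PySem.Set.contains pvPCT s && !PySem.Set.contains pvCHANGE s)))) := by
  rw [pvCATEGORY_eq]
  simp only [pvPRICE_eq, pvVOLUME_eq, pvAMOUNT_eq, pvPCT_eq, pvCHANGE_eq]
  simp only [PySem.Dict.getD_eq_get?_getD, PySem.Dict.get?_mk_cons]
  by_cases h1 : ("open" : String) = s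
  · subst h1; decide
  rw [if_neg (by simp [h1])]
  by_cases h2 : ("high" : String) = s
  · subst h2; decide
  rw [if_neg (by simp [h2])]
  by_cases h3 : ("low" : String) = s
  · subst h3; decide
  rw [if_neg (by simp [h3])]
  by_cases h4 : ("close" : String) = s
  · subst h4; decide
  rw [if_neg (by simp [h4])]
  by_cases h5 : ("pre_close" : String) = s
  · subst h5; decide
  rw [if_neg (by simp [h5])]
  by_cases h6 : ("vol" : String) = s
  · subst h6; decide
  rw [if_neg (by simp [h6])]
  by_cases h7 : ("volume" : String) = s
  · subst h7; decide
  rw [if_neg (by simp [h7])]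
  by_cases h8 : ("amount" : String) = s
  · subst h8; decide
  rw [if_neg (by simp [h8])]
  by_cases h9 : ("turnover" : String) = s
  · subst h9; decide
  rw [if_neg (by simp [h9])]
  by_cases h10 : ("pct_chg" : String) = s
  · subst h10; decide
  rw [if_neg (by simp [h10])]
  by_cases h11 : ("pct_change" : String) = s
  · subst h11; decide
  rw [if_neg (by simp [h11])]
  by_cases h12 : ("change_pct" : String) = s
  · subst h12; decide
  rw [if_neg (by simp [h12])]
  by_cases h13 : ("pctchg" : String) = s
  · subst h13; decide
  rw [if_neg (by simp [h13])]
  by_cases h14 : ("change" : String) = s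
  · subst h14; decide
  rw [if_neg (by simp [h14])]
  by_cases h15 : ("chg" : String) = s
  · subst h15; decide
  rw [if_neg (by simp [h15])]
  simp [List.contains_eq_mem, PySem.Dict.get?, Ne.symm h1, Ne.symm h2, Ne.symm h3, Ne.symm h4, Ne.symm h5, Ne.symm h6, Ne.symm h7, Ne.symm h8, Ne.symm h9, Ne.symm h10, Ne.symm h11, Ne.symm h12, Ne.symm h13, Ne.symm h14, Ne.symm h15]

lemma pvFilter_price (cols : List String) :
    cols.filter (fun c => PySem.Dict.getD pvCATEGORY (PySem.Str.lower c) "other" == "price")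
      = cols.filter pvIsP := by
  apply List.filter_congr; intro c _; rw [pvCat_price]; rfl
lemma pvFilter_volume (cols : List String) :
    cols.filter (fun c => PySem.Dict.getD pvCATEGORY (PySem.Str.lower c) "other" == "volume")
      = cols.filter pvIsV := by
  apply List.filter_congr; intro c _; rw [pvCat_volume]; rfl
lemma pvFilter_amount (cols : List String) :
    cols.filter (fun c => PySem.Dict.getD pvCATEGORY (PySem.Str.lower c) "other" == "amount")
      = cols.filter pvIsA := by
  apply List.filter_congr; intro c _; rw [pvCat_amount]; rfl
lemma pvFilter_pct (cols : List String) :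
    cols.filter (fun c => PySem.Dict.getD pvCATEGORY (PySem.Str.lower c) "other" == "pct")
      = cols.filter pvIsPc := by
  apply List.filter_congr; intro c _; rw [pvCat_pct]; rfl
lemma pvFilter_change (cols : List String) :
    cols.filter (fun c => PySem.Dict.getD pvCATEGORY (PySem.Str.lower c) "other" == "change")
      = cols.filter pvIsCh := by
  apply List.filter_congr; intro c _; rw [pvCat_change]; rfl
lemma pvFilter_other (cols : List String) :
    cols.filter (fun c => PySem.Dict.getD pvCATEGORY (PySem.Str.lower c) "other" == "other")
      = cols.filter pvIsO := by
  apply List.filter_congr; intro c _; rw [pvCat_other]; rfl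

-- ===== VERDICT (by name: the statement is the Claim_ definition above) =====
set_option maxHeartbeats 1000000 in
theorem group_numeric_cols_py_spec : Claim_equal_group_numeric_cols_py := by
  intro cols _
  show group_numeric_cols_py cols = group_numeric_cols_py_alt cols
  unfold group_numeric_cols_py group_numeric_cols_py_alt pvORDER
  simp only [List.foldl_cons, List.foldl_nil, pvFoldA, List.nil_append,
    pvFilter_price, pvFilter_volume, pvFilter_amount, pvFilter_pct, pvFilter_change, pvFilter_other]
  by_cases e1 : (List.filter pvIsP cols).isEmpty <;>
    by_cases e2 : (List.filter pvIsV cols).isEmpty <;>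
    by_cases e3 : (List.filter pvIsA cols).isEmpty <;>
    by_cases e4 : (List.filter pvIsPc cols).isEmpty <;>
    by_cases e5 : (List.filter pvIsCh cols).isEmpty <;>
    by_cases e6 : (List.filter pvIsO cols).isEmpty <;>
    simp [e1, e2, e3, e4, e5, e6, List.filter_cons]
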